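-- pv_equiv track=rewrite | github.com/EduardYan/tkinter-notes-app | utils/text_functions.py | converted_text
-- ===== SOURCE A (Python) =====
-- def converted_text(text):
-- 	"""
-- 	Return the text passed for parameter
-- 	but with some tabs for show in the interface,
-- 	of a better form.
-- 	"""
-- 	# validating for do the modifications
-- 	if len(text) > 10:
-- 		list_text = [l for l in text]
--
-- 		try:
-- 			list_text.insert(15, '\n')
-- 			list_text.insert(20, '\n')
--
-- 		except:
-- 			pass
--
-- 		new_text = ''
--
-- 		for e in list_text:
-- 			new_text += e
--
-- 		return new_text
--
-- 	# en caso no sea mayor a diez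
-- 	return text
-- ===== SOURCE B (Python) =====
-- def converted_text(text):
-- 	"""
-- 	Return the text passed for parameter
-- 	but with some tabs for show in the interface,
-- 	of a better form.
-- 	"""
-- 	if len(text) > 10:
-- 		s = text[:15] + '\n' + text[15:]
-- 		return s[:20] + '\n' + s[20:]
-- 	return text
-- ===== Notes on version B (the rewrite author's own statement) =====
-- stated objective: simpler
-- what changed: Replaces the char-list materialisation, two list.insert calls and the character-by-character string rebuild loop with two direct slice-and-concatenate expressions on the string.
import Mathlib
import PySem

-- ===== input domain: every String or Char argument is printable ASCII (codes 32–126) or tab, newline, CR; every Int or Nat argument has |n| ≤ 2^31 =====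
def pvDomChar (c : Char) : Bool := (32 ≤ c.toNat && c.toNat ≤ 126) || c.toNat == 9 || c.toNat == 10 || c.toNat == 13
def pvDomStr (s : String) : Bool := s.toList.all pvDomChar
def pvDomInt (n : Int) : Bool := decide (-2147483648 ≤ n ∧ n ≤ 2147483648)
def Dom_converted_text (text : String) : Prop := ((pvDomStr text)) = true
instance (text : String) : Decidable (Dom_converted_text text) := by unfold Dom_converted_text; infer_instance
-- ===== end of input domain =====

-- B replaces A's char-list, two list.insert calls and the character rebuild loop
-- with two slice-and-concatenate expressions; return value only, no mutation.

-- ===== PORT A =====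
def converted_text (text : String) : String :=
  if PySem.Str.len text > 10 then
    let list_text : List Char := text.toList
    let list_text := PySem.List.insert list_text 15 '\n'
    let list_text := PySem.List.insert list_text 20 '\n'
    -- new_text = ''; for e in list_text: new_text += e
    String.mk (list_text.foldl (fun acc e => acc ++ [e]) [])
  else text

-- ===== PORT B =====
def converted_text_alt (text : String) : String :=
  if PySem.Str.len text > 10 then
    let s : List Char :=
      PySem.List.slice text.toList none (some 15) ++ '\n' :: PySem.List.slice text.toList (some 15) none
    String.mk (PySem.List.slice s none (some 20) ++ '\n' :: PySem.List.slice s (some 20) none)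
  else text

-- ===== PRECONDITION & SPEC =====
def Spec_converted_text (text : String) (out : String) : Prop := out = converted_text_alt text
instance (text : String) (out : String) : Decidable (Spec_converted_text text out) := by unfold Spec_converted_text; infer_instance

-- ===== CLAIM (what is proved, stated in full; the proofs are below) =====
def Claim_equal_converted_text : Prop := ∀ (text : String), Dom_converted_text text → Spec_converted_text text (converted_text text)

-- ===== LEMMAS AND PROOFS =====

-- the rebuild loop is the identity
theorem pv_foldl_snoc (l acc : List Char) :
    l.foldl (fun acc e => acc ++ [e]) acc = acc ++ l := by
  induction l generalizing acc with
  | nil => simp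
  | cons x xs ih => simp [List.foldl, ih, List.append_assoc]

-- Python's list.insert clamps: for any list, insert at a nonnegative numeral p is take/drop splice
theorem pv_insert_eq_splice (xs : List Char) (p : Nat) (v : Char) :
    PySem.List.insert xs (p : Int) v = xs.take p ++ v :: xs.drop p := by
  by_cases h : p ≤ xs.length
  · exact PySem.List.insert_natCast xs p v h
  · push_neg at h
    have hidx : (PySem.List.sliceIndices xs.length (some (p : Int)) none 1).1.toNat = xs.length := by
      simp [PySem.List.sliceIndices]; omega
    rw [List.take_of_length_le (by omega), List.drop_of_length_le (by omega)]
    simp [PySem.List.insert, hidx]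

-- the Python-slice splice equals take/drop splice
theorem pv_slice_splice (xs : List Char) (p : Nat) (v : Char) :
    PySem.List.slice xs none (some (p : Int)) ++ v :: PySem.List.slice xs (some (p : Int)) none
      = xs.take p ++ v :: xs.drop p := by
  rw [PySem.List.slice_to, PySem.List.slice_from]
  · simp
  · positivity
  · positivity

-- ===== VERDICT (by name: the statement is the Claim_ definition above) =====
theorem converted_text_spec : Claim_equal_converted_text := by
  intro text _
  unfold Spec_converted_text converted_text converted_text_alt
  split
  · have h15 := pv_insert_eq_splice text.toList 15 '\n'
    have h20 := pv_insert_eq_splice (PySem.List.insert text.toList 15 '\n') 20 '\n'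
    have s15 := pv_slice_splice text.toList 15 '\n'
    have s20 := pv_slice_splice (List.take 15 text.toList ++ '\n' :: List.drop 15 text.toList) 20 '\n'
    push_cast at h15 h20 s15 s20
    rw [h15] at h20
    simp only [h15, h20, pv_foldl_snoc, List.nil_append, s15, s20]
  · rfl
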